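-- pv_equiv track=rewrite | github.com/manwar/perlweeklychallenge-club | challenge-185/lubos-kolouch/python/ch-2.py | mask_code
-- ===== SOURCE A (Python) =====
-- def mask_code(in_list: list) -> list:
--     """Do the magic"""
--
--     out_list = []
--
--     for item in in_list:
--         my_count = 0
--         out_char = ""
--         for char in item:
--             if char.isalnum() and my_count < 4:
--                 out_char += "x"
--                 my_count += 1
--             else:
--                 out_char += char
--         out_list.append(out_char)
--
--     return out_list
-- ===== SOURCE B (Python) =====
-- def mask_code(in_list: list) -> list:
--     """Do the magic"""
--
--     def mask(item):
--         mask_idx = set([i for i, c in enumerate(item) if c.isalnum()][:4])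
--         return "".join("x" if i in mask_idx else c for i, c in enumerate(item))
--
--     return [mask(item) for item in in_list]
-- ===== Notes on version B (the rewrite author's own statement) =====
-- stated objective: alternative
-- what changed: Replaces A's single pass carrying a mutable count<4 state with a two-phase decomposition: precompute the set of the first four alphanumeric indices, then rebuild each string by index lookup; the output list becomes a comprehension over a pure helper.
import Mathlib
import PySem

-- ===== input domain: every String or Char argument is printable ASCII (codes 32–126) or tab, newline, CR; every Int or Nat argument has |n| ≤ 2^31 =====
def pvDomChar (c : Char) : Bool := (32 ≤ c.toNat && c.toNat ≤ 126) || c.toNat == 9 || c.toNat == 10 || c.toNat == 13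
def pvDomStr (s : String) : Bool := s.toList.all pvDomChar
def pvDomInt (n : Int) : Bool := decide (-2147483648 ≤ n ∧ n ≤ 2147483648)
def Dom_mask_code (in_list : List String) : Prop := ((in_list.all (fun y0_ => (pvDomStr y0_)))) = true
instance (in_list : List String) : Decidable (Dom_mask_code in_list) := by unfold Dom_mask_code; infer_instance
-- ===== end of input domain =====

-- B replaces A's carried count<4 state with a two-phase decomposition (precompute the
-- first-4 alnum index set, then rebuild by index lookup); same asymptotic cost.

-- ===== PORT A =====
def mask_code (in_list : List String) : List String :=
  in_list.foldl (fun out_list item =>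
    let r := item.toList.foldl
      (fun (st : Int × List Char) char =>
        if PySem.Chars.isalnum char && decide (st.1 < 4)
        then (st.1 + 1, st.2 ++ ['x'])
        else (st.1, st.2 ++ [char]))
      ((0 : Int), ([] : List Char))
    out_list ++ [String.ofList r.2]) []

-- ===== PORT B =====
def maskOneB (item : String) : String :=
  let cs := item.toList
  let idxs : List Int :=
    ((PySem.List.enumerate cs 0).filter (fun p => PySem.Chars.isalnum p.2)).map (·.1)
  let maskSet : PySem.Set Int := PySem.Set.ofList (PySem.List.slice idxs none (some 4))
  String.ofList ((PySem.List.enumerate cs 0).map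
    (fun p => if PySem.Set.contains maskSet p.1 then 'x' else p.2))

def mask_code_alt (in_list : List String) : List String := in_list.map maskOneB

-- ===== PRECONDITION & SPEC =====
def Spec_mask_code (in_list : List String) (out : List String) : Prop := out = mask_code_alt in_list
instance (in_list : List String) (out : List String) : Decidable (Spec_mask_code in_list out) := by unfold Spec_mask_code; infer_instance

-- ===== CLAIM (what is proved, stated in full; the proofs are below) =====
def Claim_equal_mask_code : Prop := ∀ (in_list : List String), Dom_mask_code in_list → Spec_mask_code in_list (mask_code in_list)

-- ===== LEMMAS AND PROOFS =====

/-- Reference masking with a remaining budget `r` of characters to mask. -/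
def maskR : Nat → List Char → List Char
  | _, [] => []
  | r, c :: cs =>
    if PySem.Chars.isalnum c && decide (0 < r) then 'x' :: maskR (r - 1) cs
    else c :: maskR r cs

lemma foldA_eq_maskR (cs : List Char) (k : Int) (acc : List Char) (hk : 0 ≤ k) :
    (cs.foldl
      (fun (st : Int × List Char) char =>
        if PySem.Chars.isalnum char && decide (st.1 < 4)
        then (st.1 + 1, st.2 ++ ['x'])
        else (st.1, st.2 ++ [char]))
      (k, acc)).2 = acc ++ maskR (4 - k).toNat cs := by
  induction cs generalizing k acc with
  | nil => simp [maskR]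
  | cons c cs ih =>
    simp only [List.foldl_cons, maskR]
    by_cases hc : (PySem.Chars.isalnum c && decide (k < 4)) = true
    · have ha : PySem.Chars.isalnum c = true := by
        simp only [Bool.and_eq_true, decide_eq_true_eq] at hc; exact hc.1
      have hlt : k < 4 := by
        simp only [Bool.and_eq_true, decide_eq_true_eq] at hc; exact hc.2
      have hb : (PySem.Chars.isalnum c && decide (0 < (4 - k).toNat)) = true := by
        simp [ha]; omega
      have h1 : (4 - (k + 1)).toNat = (4 - k).toNat - 1 := by omega
      rw [if_pos hc, if_pos hb, ih (k + 1) _ (by omega), h1]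
      simp
    · have hb : (PySem.Chars.isalnum c && decide (0 < (4 - k).toNat)) = false := by
        by_cases ha : PySem.Chars.isalnum c = true
        · have hk4 : ¬ k < 4 := by simp [ha] at hc; omega
          have h0 : (4 - k).toNat = 0 := by omega
          simp [ha, h0]
        · simp [ha]
      rw [if_neg hc, if_neg (by rw [hb]; exact Bool.false_ne_true), ih k _ hk]
      simp

/-- The alnum indices of `cs` when enumeration starts at `n`. -/
def alnumIdx (cs : List Char) (n : Int) : List Int :=
  ((PySem.List.enumerate cs n).filter (fun p => PySem.Chars.isalnum p.2)).map (·.1)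

lemma mem_alnumIdx_ge (cs : List Char) (n : Int) (i : Int) (h : i ∈ alnumIdx cs n) : n ≤ i := by
  unfold alnumIdx at h
  simp only [List.mem_map, List.mem_filter] at h
  obtain ⟨p, ⟨hp, _⟩, rfl⟩ := h
  rw [PySem.List.mem_enumerate_iff] at hp
  obtain ⟨k, hk, rfl⟩ := hp
  simp

lemma fst_mem_enumerate_ge (cs : List Char) (n : Int) (p : Int × Char)
    (h : p ∈ PySem.List.enumerate cs n) : n ≤ p.1 := by
  rw [PySem.List.mem_enumerate_iff] at h
  obtain ⟨k, hk, rfl⟩ := h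
  simp

lemma mapB_eq_maskR (cs : List Char) (n : Int) (r : Nat) :
    (PySem.List.enumerate cs n).map
      (fun p => if p.1 ∈ (alnumIdx cs n).take r then 'x' else p.2) = maskR r cs := by
  induction cs generalizing n r with
  | nil => simp [PySem.List.enumerate_nil, maskR]
  | cons c cs ih =>
    rw [PySem.List.enumerate_cons]
    have hidx : alnumIdx (c :: cs) n =
        if PySem.Chars.isalnum c then n :: alnumIdx cs (n + 1) else alnumIdx cs (n + 1) := by
      unfold alnumIdx
      rw [PySem.List.enumerate_cons]
      by_cases ha : PySem.Chars.isalnum c <;> simp [ha]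
    have htail : ∀ (l : List Int),
        (PySem.List.enumerate cs (n + 1)).map
          (fun p => if p.1 = n ∨ p.1 ∈ l then 'x' else p.2) =
        (PySem.List.enumerate cs (n + 1)).map
          (fun p => if p.1 ∈ l then 'x' else p.2) := by
      intro l
      apply List.map_congr_left
      intro p hp
      have hge := fst_mem_enumerate_ge cs (n + 1) p hp
      have hne : ¬ p.1 = n := by omega
      simp [hne]
    by_cases ha : PySem.Chars.isalnum c = true
    · rw [hidx, if_pos ha]
      cases r with
      | zero =>
        simp only [List.take_zero, List.not_mem_nil, if_false, List.map_cons, maskR, ha,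
          Nat.lt_irrefl, decide_false, Bool.and_false, Bool.false_eq_true]
        exact congrArg (c :: ·) (by simpa using ih (n + 1) 0)
      | succ r' =>
        simp only [List.take_succ_cons, List.map_cons, List.mem_cons, true_or, maskR,
          ha, Nat.zero_lt_succ, decide_true, Bool.and_self, if_pos, Nat.add_sub_cancel]
        refine congrArg ('x' :: ·) ?_
        rw [List.map_congr_left (g := fun p => if p.1 = n ∨ p.1 ∈ (alnumIdx cs (n+1)).take r' then 'x' else p.2) (fun p _ => by simp), htail, ih]
    · rw [hidx, if_neg ha, List.map_cons]
      have hn : n ∉ (alnumIdx cs (n + 1)).take r := by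
        intro hmem
        have := mem_alnumIdx_ge cs (n + 1) n (List.mem_of_mem_take hmem)
        omega
      rw [if_neg hn]
      simp only [maskR, ha, Bool.false_and, Bool.false_eq_true, if_false]
      exact congrArg (c :: ·) (ih (n + 1) r)

lemma maskOneB_eq (item : String) : maskOneB item = String.ofList (maskR 4 item.toList) := by
  simp only [maskOneB]
  rw [PySem.List.slice_to _ (by norm_num), ← mapB_eq_maskR item.toList 0 4]
  have he : (((PySem.List.enumerate item.toList 0).filter
      (fun p => PySem.Chars.isalnum p.2)).map (·.1)) = alnumIdx item.toList 0 := rfl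
  rw [he]
  rw [show (Int.toNat 4) = 4 from rfl]
  congr 1
  apply List.map_congr_left
  intro p _
  have hc : (PySem.Set.contains
      (PySem.Set.ofList ((alnumIdx item.toList 0).take 4)) p.1 = true)
      ↔ p.1 ∈ (alnumIdx item.toList 0).take 4 := by
    rw [PySem.Set.contains_iff, PySem.Set.mem_ofList]
  by_cases h : p.1 ∈ (alnumIdx item.toList 0).take 4
  · rw [if_pos (hc.mpr h), if_pos h]
  · rw [if_neg (fun hh => h (hc.mp hh)), if_neg h]

-- ===== VERDICT (by name: the statement is the Claim_ definition above) =====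
theorem mask_code_spec : Claim_equal_mask_code := by
  intro in_list _
  unfold Spec_mask_code mask_code mask_code_alt
  rw [PySem.List.foldl_append_singleton_eq_map]
  simp only [List.nil_append]
  apply List.map_congr_left
  intro item _
  rw [maskOneB_eq]
  congr 1
  have := foldA_eq_maskR item.toList 0 [] (by norm_num)
  simpa using this
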